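-- pv_equiv track=rewrite | github.com/ishaanbuildsthings/leetcode | Bit Manipulation/2433: Find The Original Array of Prefix Xor.py | findArray
-- ===== SOURCE A (Python) =====
-- from typing import List
--
-- def findArray(pref: List[int]) -> List[int]:
--     runningXor = 0
--     res = []
--     for i in range(len(pref)):
--         newNum = runningXor ^ pref[i]
--         res.append(newNum)
--         runningXor = runningXor ^ res[-1]
--
--     return res
-- ===== SOURCE B (Python) =====
-- from typing import List
--
-- def findArray(pref: List[int]) -> List[int]:
--     # Each element is the XOR of adjacent prefix values: pair every prefix
--     # value with its predecessor (0 before the first) and XOR the pairs.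
--     return [a ^ b for a, b in zip([0] + pref, pref)]
-- ===== Notes on version B (the rewrite author's own statement) =====
-- stated objective: simpler
-- what changed: Replaces the running-XOR accumulator loop with a stateless zipped shifted-pair comprehension (pref[i-1] ^ pref[i], with 0 before the first element).
import Mathlib
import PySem

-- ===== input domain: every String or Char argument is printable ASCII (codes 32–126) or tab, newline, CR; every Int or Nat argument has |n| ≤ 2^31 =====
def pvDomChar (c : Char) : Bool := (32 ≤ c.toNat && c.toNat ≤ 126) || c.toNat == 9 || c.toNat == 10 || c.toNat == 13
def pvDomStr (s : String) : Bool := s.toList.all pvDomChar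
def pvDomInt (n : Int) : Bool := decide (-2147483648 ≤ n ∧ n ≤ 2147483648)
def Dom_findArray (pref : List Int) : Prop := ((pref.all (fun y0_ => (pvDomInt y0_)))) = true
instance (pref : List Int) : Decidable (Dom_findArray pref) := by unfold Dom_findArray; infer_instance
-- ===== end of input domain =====

-- B replaces the running-XOR accumulator loop with a stateless map over
-- zipped shifted pairs (each output is the XOR of adjacent prefix values).


-- ===== PORT A =====
def findArray (pref : List Int) : List Int :=
  ((PySem.List.pyRange 0 (pref.length : Int) 1).foldl
    (fun (st : Int × List Int) i =>
      let newNum := PySem.Int.bxor st.1 (PySem.List.pyGetD pref i 0)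
      let res := st.2 ++ [newNum]
      (PySem.Int.bxor st.1 ((PySem.List.pyGet? res (-1)).getD 0), res))
    (0, [])).2

-- ===== PORT B =====
def findArray_alt (pref : List Int) : List Int :=
  ((0 :: pref).zip pref).map (fun p => PySem.Int.bxor p.1 p.2)

-- ===== PRECONDITION & SPEC =====
def Spec_findArray (pref : List Int) (out : List Int) : Prop := out = findArray_alt pref
instance (pref : List Int) (out : List Int) : Decidable (Spec_findArray pref out) := by unfold Spec_findArray; infer_instance

-- ===== CLAIM (what is proved, stated in full; the proofs are below) =====
def Claim_equal_findArray : Prop := ∀ (pref : List Int), Dom_findArray pref → Spec_findArray pref (findArray pref)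

-- ===== LEMMAS AND PROOFS =====

-- A's loop body with the index access already performed (proof-only helper)
def pvBody : Int × List Int → Int → Int × List Int :=
  fun st x =>
    let newNum := PySem.Int.bxor st.1 x
    let res := st.2 ++ [newNum]
    (PySem.Int.bxor st.1 ((PySem.List.pyGet? res (-1)).getD 0), res)

-- XOR self-cancellation on PySem's Python-exact Int xor
theorem bxor_cancel_left (a b : Int) : PySem.Int.bxor a (PySem.Int.bxor a b) = b := by
  simp only [PySem.Int.bxor]
  split_ifs with h1 h2 h3 h4 h5 h6 h7 <;>
    simp_all [Nat.xor_xor_cancel_left] <;> omega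

theorem pyGet_last (acc : List Int) (y : Int) :
    PySem.List.pyGet? (acc ++ [y]) (-1) = some y := by
  simp [PySem.List.pyGet?, PySem.List.pyIdx?]

-- loop invariant: A's fold extends the accumulator with the zipped shifted pairs
theorem findArray_loop (l : List Int) (r : Int) (acc : List Int) :
    (l.foldl pvBody (r, acc)).2
      = acc ++ ((r :: l).zip l).map (fun p => PySem.Int.bxor p.1 p.2) := by
  induction l generalizing r acc with
  | nil => simp
  | cons x l ih =>
    simp only [List.foldl_cons, List.zip_cons_cons, List.map_cons, pvBody,
      pyGet_last, Option.getD_some, bxor_cancel_left]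
    rw [ih]
    simp

-- ===== VERDICT (by name: the statement is the Claim_ definition above) =====
theorem findArray_spec : Claim_equal_findArray := by
  intro pref _
  show findArray pref = findArray_alt pref
  have h := PySem.List.foldl_pyRange_pyGetD' pref 0 pvBody
    ((0 : Int), ([] : List Int)) (a := 0) (le_refl 0)
  have h2 : findArray pref = (pref.foldl pvBody ((0 : Int), ([] : List Int))).2 := by
    show (List.foldl (fun acc j => pvBody acc (PySem.List.pyGetD pref j 0))
        ((0 : Int), ([] : List Int)) (PySem.List.pyRange 0 (pref.length : Int) 1)).2 = _
    rw [h]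
    simp
  rw [h2, findArray_loop]
  simp [findArray_alt]
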